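-- pv_equiv track=rewrite | github.com/lawrab/luna-ai | luna/services/tts.py | _clean_text_for_speech
-- ===== SOURCE A (Python) =====
-- def _clean_text_for_speech(text: str) -> str:
--     """Clean text to make it more suitable for speech synthesis."""
--     # Remove or replace problematic characters
--     text = text.strip()
--
--     # Replace some common patterns that don't speak well
--     replacements = {
--         "L.U.N.A.": "Luna",
--         "AI": "A I",
--         "API": "A P I",
--         "HTTP": "H T T P",
--         "JSON": "J son",
--         "URL": "U R L",
--         "CLI": "C L I",
--         "&": "and",
--         "@": "at",
--         "#": "hash",
--         "%": "percent",
--     }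
--
--     for old, new in replacements.items():
--         text = text.replace(old, new)
--
--     # Limit length to prevent very long speech
--     if len(text) > 500:
--         text = text[:497] + "..."
--
--     return text
-- ===== SOURCE B (Python) =====
-- def _match_at(text, i):
--     """Replacement rule matching at position i, as (value, matched length)."""
--     if text.startswith("L.U.N.A.", i):
--         return "Luna", 8
--     elif text.startswith("AI", i):
--         return "A I", 2
--     elif text.startswith("API", i):
--         return "A P I", 3
--     elif text.startswith("HTTP", i):
--         return "H T T P", 4
--     elif text.startswith("JSON", i):
--         return "J son", 4
--     elif text.startswith("URL", i):
--         return "U R L", 3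
--     elif text.startswith("CLI", i):
--         return "C L I", 3
--     elif text.startswith("&", i):
--         return "and", 1
--     elif text.startswith("@", i):
--         return "at", 1
--     elif text.startswith("#", i):
--         return "hash", 1
--     elif text.startswith("%", i):
--         return "percent", 1
--     return None
--
--
-- def _clean_text_for_speech(text: str) -> str:
--     """Clean text to make it more suitable for speech synthesis."""
--     text = text.strip()
--
--     # One explicit left-to-right scan: at each position emit either the
--     # replacement of the first matching rule or the character itself.
--     out = []
--     i = 0
--     n = len(text)
--     while i < n:
--         m = _match_at(text, i)
--         if m is not None:
--             out.append(m[0])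
--             i += m[1]
--         else:
--             out.append(text[i])
--             i += 1
--     text = "".join(out)
--
--     # Limit length to prevent very long speech
--     if len(text) > 500:
--         text = text[:497] + "..."
--
--     return text
-- ===== Notes on version B (the rewrite author's own statement) =====
-- stated objective: alternative
-- what changed: The 11 sequential full-string str.replace passes are replaced by one explicit left-to-right scan that at each position applies the first matching rule of an if/elif startswith chain (or copies the character) and joins the emitted chunks at the end; Pre_ excludes texts containing 'URL.U.N.A.', the one corner where two replacement rules overlap and the result depends on the unspecified overlap-resolution strategy (A's sequential passes cascade, B's single pass takes the leftmost match; both defensible).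
-- outside the precondition, e.g. on _clean_text_for_speech('URL.U.N.A.'): A returns 'U R Luna', B returns 'U R L.U.N.A.'
import Mathlib
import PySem

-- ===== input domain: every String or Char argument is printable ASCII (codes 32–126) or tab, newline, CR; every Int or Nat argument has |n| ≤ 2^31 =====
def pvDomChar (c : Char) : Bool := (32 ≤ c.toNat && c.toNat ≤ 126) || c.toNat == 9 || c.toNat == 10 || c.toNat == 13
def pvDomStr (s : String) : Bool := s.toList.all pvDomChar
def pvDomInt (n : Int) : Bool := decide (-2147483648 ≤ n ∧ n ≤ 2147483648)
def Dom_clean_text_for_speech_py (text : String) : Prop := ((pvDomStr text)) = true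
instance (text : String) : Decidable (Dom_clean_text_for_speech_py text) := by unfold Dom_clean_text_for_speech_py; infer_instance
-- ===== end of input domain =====

-- B replaces A's 11 sequential full-string str.replace passes by one explicit left-to-right scan
-- (a first-match rule chain per position, chunks joined at the end); Pre_ excludes the one overlap
-- corner (texts containing "URL.U.N.A.") where the two strategies disagree.

-- ===== PORT A =====
-- the replacements dict, in insertion order
def pvPairs : List (List Char × List Char) :=
  [("L.U.N.A.".toList, "Luna".toList), ("AI".toList, "A I".toList), ("API".toList, "A P I".toList),
   ("HTTP".toList, "H T T P".toList), ("JSON".toList, "J son".toList), ("URL".toList, "U R L".toList),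
   ("CLI".toList, "C L I".toList), ("&".toList, "and".toList), ("@".toList, "at".toList),
   ("#".toList, "hash".toList), ("%".toList, "percent".toList)]

def clean_text_for_speech_py (text : String) : String :=
  -- text = text.strip()
  let t0 := PySem.Chars.strip text.toList
  -- for old, new in replacements.items(): text = text.replace(old, new)
  let t1 := pvPairs.foldl (fun acc p => PySem.Chars.replace acc p.1 p.2) t0
  -- if len(text) > 500: text = text[:497] + "..."
  String.ofList (if 500 < t1.length then PySem.List.slice t1 none (some 497) ++ "...".toList else t1)

-- ===== PORT B =====
-- _match_at(text, i): the if/elif chain of startswith tests, on the suffix starting at i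
def pvMatchAt (l : List Char) : Option (List Char × Nat) :=
  if "L.U.N.A.".toList.isPrefixOf l then some ("Luna".toList, 8)
  else if "AI".toList.isPrefixOf l then some ("A I".toList, 2)
  else if "API".toList.isPrefixOf l then some ("A P I".toList, 3)
  else if "HTTP".toList.isPrefixOf l then some ("H T T P".toList, 4)
  else if "JSON".toList.isPrefixOf l then some ("J son".toList, 4)
  else if "URL".toList.isPrefixOf l then some ("U R L".toList, 3)
  else if "CLI".toList.isPrefixOf l then some ("C L I".toList, 3)
  else if "&".toList.isPrefixOf l then some ("and".toList, 1)
  else if "@".toList.isPrefixOf l then some ("at".toList, 1)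
  else if "#".toList.isPrefixOf l then some ("hash".toList, 1)
  else if "%".toList.isPrefixOf l then some ("percent".toList, 1)
  else none

-- the while loop: i advances over the string (here: the remaining suffix), chunks pushed onto
-- `out` (here: a reversed accumulator).  Fuel = remaining length (each step consumes ≥ 1 char).
def pvScan : Nat → List Char → List (List Char) → List (List Char)
  | 0, _, acc => acc
  | _ + 1, [], acc => acc
  | f + 1, c :: t, acc =>
    match pvMatchAt (c :: t) with
    | some m => pvScan f ((c :: t).drop m.2) (m.1 :: acc)
    | none => pvScan f t ([c] :: acc)

def clean_text_for_speech_py_alt (text : String) : String :=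
  -- text = text.strip()
  let s := PySem.Chars.strip text.toList
  -- out = []; while i < n: … ; text = "".join(out)
  let chunks := pvScan s.length s []
  let joined := chunks.reverse.flatten
  -- if len(text) > 500: text = text[:497] + "..."
  String.ofList (if 500 < joined.length then joined.take 497 ++ "...".toList else joined)

-- ===== PRECONDITION & SPEC =====
-- Pre_ excludes texts containing "URL.U.N.A.", the one corner where two replacement rules overlap
-- and the result depends on the unspecified overlap-resolution strategy (A's sequential passes let
-- the later rule cascade into the earlier rule's output, B's single pass applies only the leftmost
-- match); both values are defensible on that corner and no caller would specify either.
def Pre_clean_text_for_speech_py (text : String) : Prop :=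
  PySem.Str.isIn "URL.U.N.A." text = false
instance (text : String) : Decidable (Pre_clean_text_for_speech_py text) := by
  unfold Pre_clean_text_for_speech_py; infer_instance

def pvWitness_clean_text_for_speech_py : String := "  hi AI & L.U.N.A. #1 "

def Spec_clean_text_for_speech_py (text : String) (out : String) : Prop :=
  out = clean_text_for_speech_py_alt text
instance (text : String) (out : String) : Decidable (Spec_clean_text_for_speech_py text out) := by
  unfold Spec_clean_text_for_speech_py; infer_instance

-- ===== CLAIM (what is proved, stated in full; the proofs are below) =====
def Claim_equal_clean_text_for_speech_py : Prop := ∀ (text : String), Dom_clean_text_for_speech_py text → Pre_clean_text_for_speech_py text → Spec_clean_text_for_speech_py text (clean_text_for_speech_py text)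

-- ===== LEMMAS AND PROOFS =====

-- the critical pattern: the only way A's sequential passes interact
def pvPat : List Char := "URL.U.N.A.".toList

-- proof-side first-match over a pair list (pvMatchAt is the unrolled instance for pvPairs)
def pvFirstMatch (ps : List (List Char × List Char)) (l : List Char) :
    Option (List Char × List Char) :=
  ps.find? (fun p => !p.1.isEmpty && p.1.isPrefixOf l)

def pvMultiGo (ps : List (List Char × List Char)) : Nat → List Char → List Char
  | _, [] => []
  | 0, l => l
  | fuel+1, c :: t =>
    match pvFirstMatch ps (c :: t) with
    | some p => p.2 ++ pvMultiGo ps fuel ((c :: t).drop p.1.length)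
    | none => c :: pvMultiGo ps fuel t

def pvMulti (ps : List (List Char × List Char)) (s : List Char) : List Char :=
  pvMultiGo ps s.length s

-- ---- a structural-fuel mirror of PySem.Chars.replace (proof-side only) ----
def pvReplGo (K V : List Char) : Nat → List Char → List Char
  | _, [] => []
  | 0, l => l
  | fuel+1, c :: t =>
    if K.isPrefixOf (c :: t) then V ++ pvReplGo K V fuel ((c :: t).drop K.length)
    else c :: pvReplGo K V fuel t

def pvRepl (K V s : List Char) : List Char := pvReplGo K V s.length s

theorem pvReplGo_fuel (K V : List Char) (hK : K ≠ []) :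
    ∀ f₁ f₂ l, l.length ≤ f₁ → l.length ≤ f₂ → pvReplGo K V f₁ l = pvReplGo K V f₂ l := by
  have hKlen : 0 < K.length := List.length_pos_iff.mpr hK
  intro f₁
  induction f₁ with
  | zero =>
    intro f₂ l h1 _
    have : l = [] := List.eq_nil_of_length_eq_zero (Nat.le_zero.mp h1)
    subst this
    cases f₂ <;> rfl
  | succ f ih =>
    intro f₂ l h1 h2
    cases l with
    | nil => cases f₂ <;> rfl
    | cons c t =>
      cases f₂ with
      | zero => simp at h2
      | succ f₂' =>
        simp only [List.length_cons] at h1 h2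
        simp only [pvReplGo]
        by_cases hp : K.isPrefixOf (c :: t)
        · simp only [hp, if_true]
          exact congrArg (V ++ ·) (ih f₂' _
            (by simp only [List.length_drop, List.length_cons]; omega)
            (by simp only [List.length_drop, List.length_cons]; omega))
        · simp only [hp]
          exact congrArg (c :: ·) (ih f₂' t (by omega) (by omega))

theorem pvRepl_pos (K V : List Char) (hK : K ≠ []) (s : List Char) (hp : K <+: s) :
    pvRepl K V s = V ++ pvRepl K V (s.drop K.length) := by
  have hKlen : 0 < K.length := List.length_pos_iff.mpr hK
  cases s with
  | nil => exact absurd (List.prefix_nil.mp hp) hK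
  | cons c t =>
    have hb : K.isPrefixOf (c :: t) = true := List.isPrefixOf_iff_prefix.mpr hp
    show pvReplGo K V (c :: t).length (c :: t) = _
    simp only [List.length_cons, pvReplGo, hb, if_true]
    congr 1
    apply pvReplGo_fuel K V hK
    · simp only [List.length_drop, List.length_cons]; omega
    · exact le_rfl

theorem pvRepl_neg (K V : List Char) (hK : K ≠ []) (c : Char) (t : List Char)
    (hp : ¬ K <+: (c :: t)) : pvRepl K V (c :: t) = c :: pvRepl K V t := by
  have hb : K.isPrefixOf (c :: t) = false := by
    by_contra h
    exact hp (List.isPrefixOf_iff_prefix.mp (by revert h; cases K.isPrefixOf (c :: t) <;> simp))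
  show pvReplGo K V (c :: t).length (c :: t) = _
  simp only [List.length_cons, pvReplGo, hb]
  rfl

theorem pvReplGo_bridge (K V : List Char) (hK : K ≠ []) :
    ∀ fuel l acc, l.length ≤ fuel →
      PySem.Chars.replace.go K V fuel l acc = acc.reverse ++ pvReplGo K V fuel l := by
  have hKlen : 0 < K.length := List.length_pos_iff.mpr hK
  intro fuel
  induction fuel with
  | zero =>
    intro l acc h1
    have : l = [] := List.eq_nil_of_length_eq_zero (Nat.le_zero.mp h1)
    subst this
    simp [PySem.Chars.replace.go, pvReplGo]
  | succ f ih =>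
    intro l acc h1
    cases l with
    | nil => simp [PySem.Chars.replace.go, pvReplGo]
    | cons c t =>
      simp only [List.length_cons] at h1
      simp only [PySem.Chars.replace.go, pvReplGo]
      by_cases hp : K.isPrefixOf (c :: t)
      · simp only [hp, if_true]
        rw [ih (List.drop K.length (c :: t)) (V.reverse ++ acc)
          (by simp only [List.length_drop, List.length_cons]; omega)]
        simp
      · simp only [hp]
        rw [ih t (c :: acc) (by omega)]
        simp

theorem replace_eq_pvRepl (s K V : List Char) (hK : K ≠ []) :
    PySem.Chars.replace s K V = pvRepl K V s := by
  have hKe : K.isEmpty = false := by cases K <;> simp_all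
  simp only [PySem.Chars.replace, hKe, Bool.false_eq_true, if_false]
  rw [pvReplGo_bridge K V hK s.length s [] le_rfl]
  simp [pvRepl]

-- ---- equations for pvMulti ----
theorem pvFirstMatch_some (ps : List (List Char × List Char)) (l : List Char)
    (p : List Char × List Char) (h : pvFirstMatch ps l = some p) :
    p ∈ ps ∧ p.1 ≠ [] ∧ p.1 <+: l := by
  have hm := List.mem_of_find?_eq_some h
  have hp := List.find?_some h
  simp only [Bool.and_eq_true, Bool.not_eq_true'] at hp
  exact ⟨hm, by
    cases p1 : p.1 <;> simp_all, List.isPrefixOf_iff_prefix.mp hp.2⟩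

theorem pvMultiGo_fuel (ps : List (List Char × List Char)) :
    ∀ f₁ f₂ l, l.length ≤ f₁ → l.length ≤ f₂ → pvMultiGo ps f₁ l = pvMultiGo ps f₂ l := by
  intro f₁
  induction f₁ with
  | zero =>
    intro f₂ l h1 _
    have : l = [] := List.eq_nil_of_length_eq_zero (Nat.le_zero.mp h1)
    subst this
    cases f₂ <;> rfl
  | succ f ih =>
    intro f₂ l h1 h2
    cases l with
    | nil => cases f₂ <;> rfl
    | cons c t =>
      cases f₂ with
      | zero => simp at h2
      | succ f₂' =>
        simp only [List.length_cons] at h1 h2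
        simp only [pvMultiGo]
        cases hm : pvFirstMatch ps (c :: t) with
        | some p =>
          obtain ⟨_, hne, _⟩ := pvFirstMatch_some ps (c :: t) p hm
          have hplen : 0 < p.1.length := List.length_pos_iff.mpr hne
          show p.2 ++ pvMultiGo ps f (List.drop p.1.length (c :: t)) =
            p.2 ++ pvMultiGo ps f₂' (List.drop p.1.length (c :: t))
          exact congrArg (p.2 ++ ·) (ih f₂' _
            (by simp only [List.length_drop, List.length_cons]; omega)
            (by simp only [List.length_drop, List.length_cons]; omega))
        | none =>
          show c :: pvMultiGo ps f t = c :: pvMultiGo ps f₂' t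
          exact congrArg (c :: ·) (ih f₂' t (by omega) (by omega))

theorem pvMulti_nil (ps : List (List Char × List Char)) : pvMulti ps [] = [] := rfl

theorem pvMulti_pos (ps : List (List Char × List Char)) (c : Char) (t : List Char)
    (p : List Char × List Char) (h : pvFirstMatch ps (c :: t) = some p) :
    pvMulti ps (c :: t) = p.2 ++ pvMulti ps ((c :: t).drop p.1.length) := by
  obtain ⟨_, hne, _⟩ := pvFirstMatch_some ps (c :: t) p h
  have hplen : 0 < p.1.length := List.length_pos_iff.mpr hne
  show pvMultiGo ps (c :: t).length (c :: t) = _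
  simp only [List.length_cons, pvMultiGo, h]
  congr 1
  apply pvMultiGo_fuel
  · simp only [List.length_drop, List.length_cons]; omega
  · exact le_rfl

theorem pvMulti_neg (ps : List (List Char × List Char)) (c : Char) (t : List Char)
    (h : pvFirstMatch ps (c :: t) = none) :
    pvMulti ps (c :: t) = c :: pvMulti ps t := by
  show pvMultiGo ps (c :: t).length (c :: t) = _
  simp only [List.length_cons, pvMultiGo, h]
  rfl

theorem pvMulti_empty (s : List Char) : pvMulti [] s = s := by
  induction s with
  | nil => rfl
  | cons c t ih =>
    rw [pvMulti_neg [] c t (by simp [pvFirstMatch])]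
    rw [ih]

-- ---- B's unrolled rule chain computes pvFirstMatch over pvPairs ----
theorem pvFM_cons (k v : List Char) (r : List (List Char × List Char)) (l : List Char)
    (hk : k.isEmpty = false) :
    pvFirstMatch ((k, v) :: r) l = if k.isPrefixOf l then some (k, v) else pvFirstMatch r l := by
  simp only [pvFirstMatch, List.find?_cons]
  cases k.isPrefixOf l <;> simp [hk]

theorem pvMatchAt_eq (l : List Char) :
    pvMatchAt l = (pvFirstMatch pvPairs l).map (fun p => (p.2, p.1.length)) := by
  simp only [pvPairs]
  rw [pvFM_cons _ _ _ _ (by decide), pvFM_cons _ _ _ _ (by decide), pvFM_cons _ _ _ _ (by decide),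
    pvFM_cons _ _ _ _ (by decide), pvFM_cons _ _ _ _ (by decide), pvFM_cons _ _ _ _ (by decide),
    pvFM_cons _ _ _ _ (by decide), pvFM_cons _ _ _ _ (by decide), pvFM_cons _ _ _ _ (by decide),
    pvFM_cons _ _ _ _ (by decide), pvFM_cons _ _ _ _ (by decide)]
  simp only [pvMatchAt, pvFirstMatch, List.find?_nil,
    apply_ite (Option.map (fun p : List Char × List Char => (p.2, p.1.length))),
    Option.map_some, Option.map_none]
  rfl

-- ---- B's scan joins to pvMulti over pvPairs ----
theorem pvScan_bridge :
    ∀ fuel l acc, l.length ≤ fuel →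
      (pvScan fuel l acc).reverse.flatten = acc.reverse.flatten ++ pvMulti pvPairs l := by
  intro fuel
  induction fuel with
  | zero =>
    intro l acc h1
    have : l = [] := List.eq_nil_of_length_eq_zero (Nat.le_zero.mp h1)
    subst this
    simp [pvScan, pvMulti_nil]
  | succ f ih =>
    intro l acc h1
    cases l with
    | nil => simp [pvScan, pvMulti_nil]
    | cons c t =>
      simp only [List.length_cons] at h1
      simp only [pvScan, pvMatchAt_eq]
      cases hm : pvFirstMatch pvPairs (c :: t) with
      | some p =>
        obtain ⟨_, hne, _⟩ := pvFirstMatch_some pvPairs (c :: t) p hm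
        have hplen : 0 < p.1.length := List.length_pos_iff.mpr hne
        simp only [Option.map_some]
        rw [ih ((c :: t).drop p.1.length) (p.2 :: acc)
          (by simp only [List.length_drop, List.length_cons]; omega)]
        rw [pvMulti_pos pvPairs c t p hm]
        simp
      | none =>
        simp only [Option.map_none]
        rw [ih t ([c] :: acc) (by omega)]
        rw [pvMulti_neg pvPairs c t hm]
        simp

-- ---- infix helpers ----
theorem pvInfix_of_infix_drop (x s : List Char) (n : Nat) (h : x <:+: s.drop n) : x <:+: s :=
  h.trans (List.drop_suffix n s).isInfix

theorem pvInfix_of_infix_tail (x : List Char) (c : Char) (t : List Char) (h : x <:+: t) :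
    x <:+: c :: t :=
  h.trans (List.suffix_cons c t).isInfix

theorem pvStrip_infix (s : List Char) : PySem.Chars.strip s <:+: s := by
  have h1 : List.dropWhile PySem.Chars.isspace s <:+ s := List.dropWhile_suffix _
  have h2 : PySem.Chars.strip s <+: List.dropWhile PySem.Chars.isspace s := by
    show PySem.Chars.rstrip (PySem.Chars.lstrip s) <+: _
    unfold PySem.Chars.rstrip PySem.Chars.lstrip
    have h3 := List.dropWhile_suffix (l := (List.dropWhile PySem.Chars.isspace s).reverse)
      (p := PySem.Chars.isspace)
    rw [show List.dropWhile PySem.Chars.isspace (List.dropWhile PySem.Chars.isspace s).reverse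
        = (List.dropWhile PySem.Chars.isspace
            (List.dropWhile PySem.Chars.isspace s).reverse).reverse.reverse from by simp] at h3
    exact List.reverse_suffix.mp h3
  exact h2.isInfix.trans h1.isInfix

-- ---- replace distributes over an occurrence-free left part ----
theorem pvRepl_append (K V u w : List Char) (hK : K ≠ [])
    (h : ∀ q, q < u.length → ¬ K <+: (u ++ w).drop q) :
    pvRepl K V (u ++ w) = u ++ pvRepl K V w := by
  induction u with
  | nil => simp
  | cons c u' ih =>
    have h0 : ¬ K <+: (c :: (u' ++ w)) := by
      have := h 0 (by simp)
      simpa using this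
    rw [List.cons_append, pvRepl_neg K V hK c (u' ++ w) h0]
    rw [ih (fun q hq => by
      have := h (q + 1) (by simp only [List.length_cons]; omega)
      simpa using this)]
    rfl

-- ---- the single pass copies an untouched prefix verbatim ----
theorem pvMulti_take (ps : List (List Char × List Char)) (hps : ∀ p ∈ ps, p.1 ≠ []) :
    ∀ m s, (∀ q, q < m → ∀ p ∈ ps, ¬ p.1 <+: s.drop q) →
      pvMulti ps s = s.take m ++ pvMulti ps (s.drop m) := by
  intro m
  induction m with
  | zero => simp
  | succ m ih =>
    intro s h
    cases s with
    | nil => simp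
    | cons c t =>
      have hnone : pvFirstMatch ps (c :: t) = none := by
        rw [pvFirstMatch, List.find?_eq_none]
        intro p hp
        have hnp : ¬ p.1 <+: (c :: t) := by simpa using h 0 (by omega) p hp
        cases hpf : p.1.isPrefixOf (c :: t) with
        | false => simp [hpf]
        | true => exact absurd (List.isPrefixOf_iff_prefix.mp hpf) hnp
      rw [pvMulti_neg _ _ _ hnone]
      rw [ih t (fun q hq p hp => by
        have := h (q + 1) (by omega) p hp
        simpa using this)]
      simp

-- ---- where can a proper suffix of the new key appear as a prefix of the pass output ----
theorem pvMulti_suffix_prefix (ps : List (List Char × List Char)) (K : List Char)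
    (hvink : ∀ p ∈ ps, ∀ q, q < K.length + 1 → q + p.2.length ≤ K.length → ¬ (p.2 <+: K.drop q)) :
    ∀ n t, t.length ≤ n → ∀ q, 0 < q → q < K.length → K.drop q <+: pvMulti ps t →
      K.drop q <+: t ∨ ∃ p ∈ ps, ∃ r, q ≤ r ∧ r < K.length ∧
        ((K.drop q).take (r - q) ++ p.1 <+: t) ∧ K.drop r <+: p.2 := by
  intro n
  induction n with
  | zero =>
    intro t ht q h0 hq hpre
    have : t = [] := List.eq_nil_of_length_eq_zero (Nat.le_zero.mp ht)
    subst this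
    rw [pvMulti_nil] at hpre
    have := hpre.length_le
    simp only [List.length_drop, List.length_nil] at this
    omega
  | succ n ih =>
    intro t ht q h0 hq hpre
    cases t with
    | nil =>
      rw [pvMulti_nil] at hpre
      have := hpre.length_le
      simp only [List.length_drop, List.length_nil] at this
      omega
    | cons c u =>
      simp only [List.length_cons] at ht
      cases hm : pvFirstMatch ps (c :: u) with
      | none =>
        rw [pvMulti_neg _ _ _ hm] at hpre
        have hdq : K.drop q = K[q] :: K.drop (q + 1) := List.drop_eq_getElem_cons hq
        rw [hdq] at hpre
        obtain ⟨hc, htail⟩ := List.cons_prefix_cons.mp hpre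
        by_cases hlast : q + 1 = K.length
        · left
          rw [hdq]
          have : K.drop (q + 1) = [] := by
            apply List.eq_nil_of_length_eq_zero
            simp only [List.length_drop]; omega
          rw [this]
          rw [List.cons_prefix_cons]
          exact ⟨hc, List.nil_prefix⟩
        · rcases ih u (by omega) (q + 1) (by omega) (by omega) htail with h | ⟨p, hp, r, hr1, hr2, hocc, hvp⟩
          · left
            rw [hdq, List.cons_prefix_cons]
            exact ⟨hc, by simpa using h⟩
          · right
            refine ⟨p, hp, r, by omega, hr2, ?_, hvp⟩
            have hshape : (K.drop q).take (r - q) = K[q] :: (K.drop (q + 1)).take (r - (q + 1)) := by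
              rw [hdq]
              rw [show r - q = (r - (q + 1)) + 1 from by omega]
              rfl
            rw [hshape, List.cons_append, hc, List.cons_prefix_cons]
            exact ⟨rfl, hocc⟩
      | some p =>
        obtain ⟨hmem, hpne, hppre⟩ := pvFirstMatch_some ps (c :: u) p hm
        rw [pvMulti_pos _ _ _ _ hm] at hpre
        by_cases hlen : K.length - q ≤ p.2.length
        · right
          refine ⟨p, hmem, q, le_rfl, hq, ?_, ?_⟩
          · simp only [Nat.sub_self, List.take_zero, List.nil_append]
            exact hppre
          · exact List.prefix_of_prefix_length_le hpre (List.prefix_append _ _)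
              (by simp only [List.length_drop]; omega)
        · exfalso
          have hp2 : p.2 <+: K.drop q := by
            apply List.prefix_of_prefix_length_le (List.prefix_append _ _) hpre
            simp only [List.length_drop]; omega
          exact hvink p hmem q (by omega) (by omega) hp2

-- ---- the fusion step: one more sequential replace = one more alternative in the pass ----
theorem pvFusion (K V : List Char) (ps : List (List Char × List Char))
    (hK : K ≠ [])
    (hps : ∀ p ∈ ps, p.1 ≠ [])
    (hval : ∀ p ∈ ps, ¬ K <:+: p.2)
    (hsv : ∀ p ∈ ps, ∀ q, q < p.2.length → p.2.length - q < K.length → ¬ (p.2.drop q <+: K))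
    (hin : ∀ p ∈ ps, ∀ q, q < K.length → 0 < q → q + p.1.length ≤ K.length → ¬ (p.1 <+: K.drop q))
    (hvink : ∀ p ∈ ps, ∀ q, q < K.length + 1 → q + p.2.length ≤ K.length → ¬ (p.2 <+: K.drop q)) :
    ∀ n s, s.length ≤ n →
      (∀ p ∈ ps, ∀ q, q < K.length → 0 < q → K.drop q <+: p.1 → ¬ ((K.take q ++ p.1) <:+: s)) →
      (∀ p ∈ ps, ∀ r, r < K.length → 0 < r → K.drop r <+: p.2 → ¬ ((K.take r ++ p.1) <:+: s)) →
      pvRepl K V (pvMulti ps s) = pvMulti (ps ++ [(K, V)]) s := by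
  have hKlen : 0 < K.length := List.length_pos_iff.mpr hK
  intro n
  induction n with
  | zero =>
    intro s hs _ _
    have : s = [] := List.eq_nil_of_length_eq_zero (Nat.le_zero.mp hs)
    subst this
    rfl
  | succ n ih =>
    intro s hs hspan hmerge
    cases s with
    | nil => rfl
    | cons c t =>
      simp only [List.length_cons] at hs
      cases hm : pvFirstMatch ps (c :: t) with
      | some p =>
        obtain ⟨hmem, hpne, hppre⟩ := pvFirstMatch_some ps (c :: t) p hm
        have hplen : 0 < p.1.length := List.length_pos_iff.mpr hpne
        have hmExt : pvFirstMatch (ps ++ [(K, V)]) (c :: t) = some p := by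
          rw [pvFirstMatch, List.find?_append]
          rw [pvFirstMatch] at hm
          rw [hm]
          rfl
        rw [pvMulti_pos _ _ _ _ hm, pvMulti_pos _ _ _ _ hmExt]
        have hnoK : ∀ q, q < p.2.length →
            ¬ K <+: (p.2 ++ pvMulti ps ((c :: t).drop p.1.length)).drop q := by
          intro q hq hKpre
          rw [List.drop_append_of_le_length (by omega)] at hKpre
          by_cases hl : K.length ≤ p.2.length - q
          · have hKin : K <+: p.2.drop q := by
              apply List.prefix_of_prefix_length_le hKpre (List.prefix_append _ _)
              simp only [List.length_drop]; omega
            exact hval p hmem (hKin.isInfix.trans (List.drop_suffix q p.2).isInfix)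
          · have hdp : p.2.drop q <+: K := by
              apply List.prefix_of_prefix_length_le (List.prefix_append _ _) hKpre
              simp only [List.length_drop]; omega
            exact hsv p hmem q hq (by omega) hdp
        rw [pvRepl_append K V _ _ hK hnoK]
        congr 1
        apply ih ((c :: t).drop p.1.length)
          (by simp only [List.length_drop, List.length_cons]; omega)
        · intro p' hp' q h1 h2 h3 hinf
          exact hspan p' hp' q h1 h2 h3 (pvInfix_of_infix_drop _ _ _ hinf)
        · intro p' hp' r h1 h2 h3 hinf
          exact hmerge p' hp' r h1 h2 h3 (pvInfix_of_infix_drop _ _ _ hinf)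
      | none =>
        have hnops : ∀ p ∈ ps, ¬ p.1 <+: (c :: t) := by
          intro p hp hpre
          rw [pvFirstMatch, List.find?_eq_none] at hm
          have := hm p hp
          have he : p.1.isEmpty = false := by
            cases hp1 : p.1 with
            | nil => exact absurd hp1 (hps p hp)
            | cons a b => simp
          simp [he, List.isPrefixOf_iff_prefix.mpr hpre] at this
        by_cases hKs : K <+: (c :: t)
        · -- the new key matches here: the untouched prefix of length |K| is consumed
          obtain ⟨rest, hrest⟩ := hKs
          have hq : ∀ q, q < K.length → ∀ p ∈ ps, ¬ p.1 <+: (c :: t).drop q := by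
            intro q hqK p hp hpre
            rcases Nat.eq_zero_or_pos q with h0 | h0
            · subst h0; exact hnops p hp (by simpa using hpre)
            · have hdecomp : (c :: t).drop q = K.drop q ++ rest := by
                rw [← hrest, List.drop_append_of_le_length (by omega)]
              rw [hdecomp] at hpre
              by_cases hfit : q + p.1.length ≤ K.length
              · have : p.1 <+: K.drop q := by
                  apply List.prefix_of_prefix_length_le hpre (List.prefix_append _ _)
                  simp only [List.length_drop]; omega
                exact hin p hp q hqK h0 hfit this
              · have hKq : K.drop q <+: p.1 := by
                  apply List.prefix_of_prefix_length_le (List.prefix_append _ _) hpre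
                  simp only [List.length_drop]; omega
                have hocc : K.take q ++ p.1 <+: (c :: t) := by
                  obtain ⟨z, hz⟩ := hpre
                  refine ⟨z, ?_⟩
                  rw [List.append_assoc]
                  rw [show K.drop q ++ rest = (c :: t).drop q from by
                    rw [← hrest, List.drop_append_of_le_length (by omega)]] at hz
                  rw [hz]
                  conv_rhs => rw [← List.take_append_drop q (c :: t)]
                  congr 1
                  rw [← hrest, List.take_append_of_le_length (by omega)]
                exact hspan p hp q hqK h0 hKq hocc.isInfix
          rw [pvMulti_take ps hps K.length (c :: t) hq]
          have htake : (c :: t).take K.length = K := by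
            rw [← hrest, List.take_left']
            rfl
          rw [htake]
          rw [pvRepl_pos K V hK _ (List.prefix_append _ _), List.drop_left]
          have hmExt : pvFirstMatch (ps ++ [(K, V)]) (c :: t) = some (K, V) := by
            rw [pvFirstMatch, List.find?_append]
            rw [pvFirstMatch] at hm
            rw [hm]
            simp [List.isPrefixOf_iff_prefix.mpr ⟨rest, hrest⟩,
              List.isEmpty_eq_false_iff, hK]
          rw [pvMulti_pos _ _ _ _ hmExt]
          congr 1
          apply ih ((c :: t).drop K.length)
            (by simp only [List.length_drop, List.length_cons]; omega)
          · intro p' hp' q h1 h2 h3 hinf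
            exact hspan p' hp' q h1 h2 h3 (pvInfix_of_infix_drop _ _ _ hinf)
          · intro p' hp' r h1 h2 h3 hinf
            exact hmerge p' hp' r h1 h2 h3 (pvInfix_of_infix_drop _ _ _ hinf)
        · -- the new key does not match here either
          have hmExt : pvFirstMatch (ps ++ [(K, V)]) (c :: t) = none := by
            rw [pvFirstMatch, List.find?_append]
            rw [pvFirstMatch] at hm
            rw [hm]
            have : K.isPrefixOf (c :: t) = false := by
              cases hb : K.isPrefixOf (c :: t) with
              | false => rfl
              | true => exact absurd (List.isPrefixOf_iff_prefix.mp hb) hKs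
            simp [this]
          rw [pvMulti_neg _ _ _ hm, pvMulti_neg _ _ _ hmExt]
          have hnotpre : ¬ K <+: (c :: pvMulti ps t) := by
            intro hKp
            obtain ⟨k, κ, hKc⟩ := List.exists_cons_of_ne_nil hK
            rw [hKc, List.cons_prefix_cons] at hKp
            obtain ⟨hkc, hκ⟩ := hKp
            by_cases h1 : κ = []
            · apply hKs
              rw [hKc, h1, hkc, List.cons_prefix_cons]
              exact ⟨rfl, List.nil_prefix⟩
            · have hκlen : 0 < κ.length := List.length_pos_iff.mpr h1
              have hdrop1 : K.drop 1 = κ := by rw [hKc]; rfl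
              rcases pvMulti_suffix_prefix ps K hvink t.length t le_rfl 1
                (by omega) (by rw [hKc]; simp only [List.length_cons]; omega)
                (by rw [hdrop1]; exact hκ) with h | ⟨p, hp, r, hr1, hr2, hocc, hvp⟩
              · apply hKs
                rw [hKc, hkc, List.cons_prefix_cons]
                refine ⟨rfl, ?_⟩
                rw [hdrop1] at h
                exact h
              · have hshape : K.take r = c :: κ.take (r - 1) := by
                  rw [hKc, hkc, show r = (r - 1) + 1 from by omega]
                  rfl
                have hocc' : K.take r ++ p.1 <+: (c :: t) := by
                  rw [hshape, List.cons_append, List.cons_prefix_cons]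
                  refine ⟨rfl, ?_⟩
                  rw [hdrop1] at hocc
                  exact hocc
                exact hmerge p hp r hr2 (by omega) hvp hocc'.isInfix
          rw [pvRepl_neg K V hK c _ hnotpre]
          congr 1
          apply ih t (by omega)
          · intro p' hp' q h1 h2 h3 hinf
            exact hspan p' hp' q h1 h2 h3 (pvInfix_of_infix_tail _ _ _ hinf)
          · intro p' hp' r h1 h2 h3 hinf
            exact hmerge p' hp' r h1 h2 h3 (pvInfix_of_infix_tail _ _ _ hinf)

-- ---- packaging the text-dependent hypotheses from ¬"URL.U.N.A." ----
theorem pvMkSpan {K : List Char} {ps : List (List Char × List Char)} {s : List Char}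
    (hpat : ¬ pvPat <:+: s)
    (hmeta : ∀ p ∈ ps, ∀ q, q < K.length → 0 < q → K.drop q <+: p.1 → K.take q ++ p.1 = pvPat) :
    ∀ p ∈ ps, ∀ q, q < K.length → 0 < q → K.drop q <+: p.1 → ¬ ((K.take q ++ p.1) <:+: s) :=
  fun p hp q h1 h2 h3 hinf => hpat (hmeta p hp q h1 h2 h3 ▸ hinf)

theorem pvMkMerge {K : List Char} {ps : List (List Char × List Char)} {s : List Char}
    (hpat : ¬ pvPat <:+: s)
    (hmeta : ∀ p ∈ ps, ∀ r, r < K.length → 0 < r → K.drop r <+: p.2 → K.take r ++ p.1 = pvPat) :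
    ∀ p ∈ ps, ∀ r, r < K.length → 0 < r → K.drop r <+: p.2 → ¬ ((K.take r ++ p.1) <:+: s) :=
  fun p hp r h1 h2 h3 hinf => hpat (hmeta p hp r h1 h2 h3 ▸ hinf)

-- ---- replace = pvRepl through the fold ----
theorem pvFoldl_replace (l : List (List Char × List Char)) (hl : ∀ p ∈ l, p.1 ≠ []) :
    ∀ s, l.foldl (fun acc p => PySem.Chars.replace acc p.1 p.2) s
       = l.foldl (fun acc p => pvRepl p.1 p.2 acc) s := by
  induction l with
  | nil => intro s; rfl
  | cons p l' ih =>
    intro s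
    simp only [List.foldl_cons]
    rw [replace_eq_pvRepl s p.1 p.2 (hl p (by simp))]
    exact ih (fun p' hp' => hl p' (by simp [hp'])) _

-- ---- chaining the 11 fusion steps ----
theorem pvChain (s : List Char) (hpat : ¬ pvPat <:+: s) :
    pvPairs.foldl (fun acc p => PySem.Chars.replace acc p.1 p.2) s = pvMulti pvPairs s := by
  rw [pvFoldl_replace pvPairs (by decide) s]
  have step1 : pvRepl "L.U.N.A.".toList "Luna".toList (pvMulti ([] : List (List Char × List Char)) s)
      = pvMulti ([("L.U.N.A.".toList, "Luna".toList)] : List (List Char × List Char)) s := by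
    have := pvFusion "L.U.N.A.".toList "Luna".toList ([] : List (List Char × List Char))
      (by decide) (by decide) (by decide) (by decide) (by decide) (by decide)
      s.length s le_rfl (pvMkSpan hpat (by decide)) (pvMkMerge hpat (by decide))
    simpa using this
  have step2 : pvRepl "AI".toList "A I".toList (pvMulti ([("L.U.N.A.".toList, "Luna".toList)] : List (List Char × List Char)) s)
      = pvMulti ([("L.U.N.A.".toList, "Luna".toList), ("AI".toList, "A I".toList)] : List (List Char × List Char)) s := by
    have := pvFusion "AI".toList "A I".toList ([("L.U.N.A.".toList, "Luna".toList)] : List (List Char × List Char))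
      (by decide) (by decide) (by decide) (by decide) (by decide) (by decide)
      s.length s le_rfl (pvMkSpan hpat (by decide)) (pvMkMerge hpat (by decide))
    simpa using this
  have step3 : pvRepl "API".toList "A P I".toList (pvMulti ([("L.U.N.A.".toList, "Luna".toList), ("AI".toList, "A I".toList)] : List (List Char × List Char)) s)
      = pvMulti ([("L.U.N.A.".toList, "Luna".toList), ("AI".toList, "A I".toList), ("API".toList, "A P I".toList)] : List (List Char × List Char)) s := by
    have := pvFusion "API".toList "A P I".toList ([("L.U.N.A.".toList, "Luna".toList), ("AI".toList, "A I".toList)] : List (List Char × List Char))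
      (by decide) (by decide) (by decide) (by decide) (by decide) (by decide)
      s.length s le_rfl (pvMkSpan hpat (by decide)) (pvMkMerge hpat (by decide))
    simpa using this
  have step4 : pvRepl "HTTP".toList "H T T P".toList (pvMulti ([("L.U.N.A.".toList, "Luna".toList), ("AI".toList, "A I".toList), ("API".toList, "A P I".toList)] : List (List Char × List Char)) s)
      = pvMulti ([("L.U.N.A.".toList, "Luna".toList), ("AI".toList, "A I".toList), ("API".toList, "A P I".toList), ("HTTP".toList, "H T T P".toList)] : List (List Char × List Char)) s := by
    have := pvFusion "HTTP".toList "H T T P".toList ([("L.U.N.A.".toList, "Luna".toList), ("AI".toList, "A I".toList), ("API".toList, "A P I".toList)] : List (List Char × List Char))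
      (by decide) (by decide) (by decide) (by decide) (by decide) (by decide)
      s.length s le_rfl (pvMkSpan hpat (by decide)) (pvMkMerge hpat (by decide))
    simpa using this
  have step5 : pvRepl "JSON".toList "J son".toList (pvMulti ([("L.U.N.A.".toList, "Luna".toList), ("AI".toList, "A I".toList), ("API".toList, "A P I".toList), ("HTTP".toList, "H T T P".toList)] : List (List Char × List Char)) s)
      = pvMulti ([("L.U.N.A.".toList, "Luna".toList), ("AI".toList, "A I".toList), ("API".toList, "A P I".toList), ("HTTP".toList, "H T T P".toList), ("JSON".toList, "J son".toList)] : List (List Char × List Char)) s := by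
    have := pvFusion "JSON".toList "J son".toList ([("L.U.N.A.".toList, "Luna".toList), ("AI".toList, "A I".toList), ("API".toList, "A P I".toList), ("HTTP".toList, "H T T P".toList)] : List (List Char × List Char))
      (by decide) (by decide) (by decide) (by decide) (by decide) (by decide)
      s.length s le_rfl (pvMkSpan hpat (by decide)) (pvMkMerge hpat (by decide))
    simpa using this
  have step6 : pvRepl "URL".toList "U R L".toList (pvMulti ([("L.U.N.A.".toList, "Luna".toList), ("AI".toList, "A I".toList), ("API".toList, "A P I".toList), ("HTTP".toList, "H T T P".toList), ("JSON".toList, "J son".toList)] : List (List Char × List Char)) s)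
      = pvMulti ([("L.U.N.A.".toList, "Luna".toList), ("AI".toList, "A I".toList), ("API".toList, "A P I".toList), ("HTTP".toList, "H T T P".toList), ("JSON".toList, "J son".toList), ("URL".toList, "U R L".toList)] : List (List Char × List Char)) s := by
    have := pvFusion "URL".toList "U R L".toList ([("L.U.N.A.".toList, "Luna".toList), ("AI".toList, "A I".toList), ("API".toList, "A P I".toList), ("HTTP".toList, "H T T P".toList), ("JSON".toList, "J son".toList)] : List (List Char × List Char))
      (by decide) (by decide) (by decide) (by decide) (by decide) (by decide)
      s.length s le_rfl (pvMkSpan hpat (by decide)) (pvMkMerge hpat (by decide))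
    simpa using this
  have step7 : pvRepl "CLI".toList "C L I".toList (pvMulti ([("L.U.N.A.".toList, "Luna".toList), ("AI".toList, "A I".toList), ("API".toList, "A P I".toList), ("HTTP".toList, "H T T P".toList), ("JSON".toList, "J son".toList), ("URL".toList, "U R L".toList)] : List (List Char × List Char)) s)
      = pvMulti ([("L.U.N.A.".toList, "Luna".toList), ("AI".toList, "A I".toList), ("API".toList, "A P I".toList), ("HTTP".toList, "H T T P".toList), ("JSON".toList, "J son".toList), ("URL".toList, "U R L".toList), ("CLI".toList, "C L I".toList)] : List (List Char × List Char)) s := by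
    have := pvFusion "CLI".toList "C L I".toList ([("L.U.N.A.".toList, "Luna".toList), ("AI".toList, "A I".toList), ("API".toList, "A P I".toList), ("HTTP".toList, "H T T P".toList), ("JSON".toList, "J son".toList), ("URL".toList, "U R L".toList)] : List (List Char × List Char))
      (by decide) (by decide) (by decide) (by decide) (by decide) (by decide)
      s.length s le_rfl (pvMkSpan hpat (by decide)) (pvMkMerge hpat (by decide))
    simpa using this
  have step8 : pvRepl "&".toList "and".toList (pvMulti ([("L.U.N.A.".toList, "Luna".toList), ("AI".toList, "A I".toList), ("API".toList, "A P I".toList), ("HTTP".toList, "H T T P".toList), ("JSON".toList, "J son".toList), ("URL".toList, "U R L".toList), ("CLI".toList, "C L I".toList)] : List (List Char × List Char)) s)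
      = pvMulti ([("L.U.N.A.".toList, "Luna".toList), ("AI".toList, "A I".toList), ("API".toList, "A P I".toList), ("HTTP".toList, "H T T P".toList), ("JSON".toList, "J son".toList), ("URL".toList, "U R L".toList), ("CLI".toList, "C L I".toList), ("&".toList, "and".toList)] : List (List Char × List Char)) s := by
    have := pvFusion "&".toList "and".toList ([("L.U.N.A.".toList, "Luna".toList), ("AI".toList, "A I".toList), ("API".toList, "A P I".toList), ("HTTP".toList, "H T T P".toList), ("JSON".toList, "J son".toList), ("URL".toList, "U R L".toList), ("CLI".toList, "C L I".toList)] : List (List Char × List Char))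
      (by decide) (by decide) (by decide) (by decide) (by decide) (by decide)
      s.length s le_rfl (pvMkSpan hpat (by decide)) (pvMkMerge hpat (by decide))
    simpa using this
  have step9 : pvRepl "@".toList "at".toList (pvMulti ([("L.U.N.A.".toList, "Luna".toList), ("AI".toList, "A I".toList), ("API".toList, "A P I".toList), ("HTTP".toList, "H T T P".toList), ("JSON".toList, "J son".toList), ("URL".toList, "U R L".toList), ("CLI".toList, "C L I".toList), ("&".toList, "and".toList)] : List (List Char × List Char)) s)
      = pvMulti ([("L.U.N.A.".toList, "Luna".toList), ("AI".toList, "A I".toList), ("API".toList, "A P I".toList), ("HTTP".toList, "H T T P".toList), ("JSON".toList, "J son".toList), ("URL".toList, "U R L".toList), ("CLI".toList, "C L I".toList), ("&".toList, "and".toList), ("@".toList, "at".toList)] : List (List Char × List Char)) s := by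
    have := pvFusion "@".toList "at".toList ([("L.U.N.A.".toList, "Luna".toList), ("AI".toList, "A I".toList), ("API".toList, "A P I".toList), ("HTTP".toList, "H T T P".toList), ("JSON".toList, "J son".toList), ("URL".toList, "U R L".toList), ("CLI".toList, "C L I".toList), ("&".toList, "and".toList)] : List (List Char × List Char))
      (by decide) (by decide) (by decide) (by decide) (by decide) (by decide)
      s.length s le_rfl (pvMkSpan hpat (by decide)) (pvMkMerge hpat (by decide))
    simpa using this
  have step10 : pvRepl "#".toList "hash".toList (pvMulti ([("L.U.N.A.".toList, "Luna".toList), ("AI".toList, "A I".toList), ("API".toList, "A P I".toList), ("HTTP".toList, "H T T P".toList), ("JSON".toList, "J son".toList), ("URL".toList, "U R L".toList), ("CLI".toList, "C L I".toList), ("&".toList, "and".toList), ("@".toList, "at".toList)] : List (List Char × List Char)) s)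
      = pvMulti ([("L.U.N.A.".toList, "Luna".toList), ("AI".toList, "A I".toList), ("API".toList, "A P I".toList), ("HTTP".toList, "H T T P".toList), ("JSON".toList, "J son".toList), ("URL".toList, "U R L".toList), ("CLI".toList, "C L I".toList), ("&".toList, "and".toList), ("@".toList, "at".toList), ("#".toList, "hash".toList)] : List (List Char × List Char)) s := by
    have := pvFusion "#".toList "hash".toList ([("L.U.N.A.".toList, "Luna".toList), ("AI".toList, "A I".toList), ("API".toList, "A P I".toList), ("HTTP".toList, "H T T P".toList), ("JSON".toList, "J son".toList), ("URL".toList, "U R L".toList), ("CLI".toList, "C L I".toList), ("&".toList, "and".toList), ("@".toList, "at".toList)] : List (List Char × List Char))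
      (by decide) (by decide) (by decide) (by decide) (by decide) (by decide)
      s.length s le_rfl (pvMkSpan hpat (by decide)) (pvMkMerge hpat (by decide))
    simpa using this
  have step11 : pvRepl "%".toList "percent".toList (pvMulti ([("L.U.N.A.".toList, "Luna".toList), ("AI".toList, "A I".toList), ("API".toList, "A P I".toList), ("HTTP".toList, "H T T P".toList), ("JSON".toList, "J son".toList), ("URL".toList, "U R L".toList), ("CLI".toList, "C L I".toList), ("&".toList, "and".toList), ("@".toList, "at".toList), ("#".toList, "hash".toList)] : List (List Char × List Char)) s)
      = pvMulti ([("L.U.N.A.".toList, "Luna".toList), ("AI".toList, "A I".toList), ("API".toList, "A P I".toList), ("HTTP".toList, "H T T P".toList), ("JSON".toList, "J son".toList), ("URL".toList, "U R L".toList), ("CLI".toList, "C L I".toList), ("&".toList, "and".toList), ("@".toList, "at".toList), ("#".toList, "hash".toList), ("%".toList, "percent".toList)] : List (List Char × List Char)) s := by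
    have := pvFusion "%".toList "percent".toList ([("L.U.N.A.".toList, "Luna".toList), ("AI".toList, "A I".toList), ("API".toList, "A P I".toList), ("HTTP".toList, "H T T P".toList), ("JSON".toList, "J son".toList), ("URL".toList, "U R L".toList), ("CLI".toList, "C L I".toList), ("&".toList, "and".toList), ("@".toList, "at".toList), ("#".toList, "hash".toList)] : List (List Char × List Char))
      (by decide) (by decide) (by decide) (by decide) (by decide) (by decide)
      s.length s le_rfl (pvMkSpan hpat (by decide)) (pvMkMerge hpat (by decide))
    simpa using this
  simp only [pvPairs, List.foldl_cons, List.foldl_nil]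
  have e0 := pvMulti_empty s
  have e1 := (congrArg (pvRepl "L.U.N.A.".toList "Luna".toList) e0.symm).trans step1
  have e2 := (congrArg (pvRepl "AI".toList "A I".toList) e1).trans step2
  have e3 := (congrArg (pvRepl "API".toList "A P I".toList) e2).trans step3
  have e4 := (congrArg (pvRepl "HTTP".toList "H T T P".toList) e3).trans step4
  have e5 := (congrArg (pvRepl "JSON".toList "J son".toList) e4).trans step5
  have e6 := (congrArg (pvRepl "URL".toList "U R L".toList) e5).trans step6
  have e7 := (congrArg (pvRepl "CLI".toList "C L I".toList) e6).trans step7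
  have e8 := (congrArg (pvRepl "&".toList "and".toList) e7).trans step8
  have e9 := (congrArg (pvRepl "@".toList "at".toList) e8).trans step9
  have e10 := (congrArg (pvRepl "#".toList "hash".toList) e9).trans step10
  have e11 := (congrArg (pvRepl "%".toList "percent".toList) e10).trans step11
  exact e11

-- ===== VERDICT (by name: the statement is the Claim_ definition above) =====
theorem clean_text_for_speech_py_spec : Claim_equal_clean_text_for_speech_py := by
  intro text _ hpre
  show clean_text_for_speech_py text = clean_text_for_speech_py_alt text
  have hpat0 : ¬ pvPat <:+: text.toList := by
    intro h
    unfold Pre_clean_text_for_speech_py at hpre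
    rw [(PySem.Str.isIn_iff_infix _ _).mpr h] at hpre
    simp at hpre
  have hpat : ¬ pvPat <:+: PySem.Chars.strip text.toList :=
    fun h => hpat0 (h.trans (pvStrip_infix text.toList))
  unfold clean_text_for_speech_py clean_text_for_speech_py_alt
  have hjoin : (pvScan (PySem.Chars.strip text.toList).length (PySem.Chars.strip text.toList)
      []).reverse.flatten = pvMulti pvPairs (PySem.Chars.strip text.toList) := by
    simpa using pvScan_bridge (PySem.Chars.strip text.toList).length
      (PySem.Chars.strip text.toList) [] le_rfl
  simp only [pvChain (PySem.Chars.strip text.toList) hpat, hjoin]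
  rw [PySem.List.slice_to (hb := by norm_num)]
  rfl
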